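-- pv_equiv track=rewrite | github.com/holy-8/wilc-lang | wilc-lang/interpreter.py | get_instruction
-- ===== SOURCE A (Python) =====
-- def get_instruction(line: str) -> tuple[str, str]:
--     instruction = ''
--     index = 0
--
--     for index, char in enumerate(line, start=1):
--         if not instruction and char == ';': break
--         if instruction and char in ' ;': break
--         if char == ' ': continue
--         instruction += char
--
--     return instruction, line[index:]
-- ===== SOURCE B (Python) =====
-- def get_instruction(line: str) -> tuple[str, str]:
--     s = line.lstrip(' ')
--     ds = [i for i in (s.find(' '), s.find(';')) if i != -1]
--     if not ds:
--         return s, ''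
--     e = min(ds)
--     return s[:e], s[e + 1:]
-- ===== Notes on version B (the rewrite author's own statement) =====
-- stated objective: simpler
-- what changed: Replaces the char-by-char accumulating loop (index/break bookkeeping) by lstrip plus two find() calls and slicing at the earliest delimiter.
import Mathlib
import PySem

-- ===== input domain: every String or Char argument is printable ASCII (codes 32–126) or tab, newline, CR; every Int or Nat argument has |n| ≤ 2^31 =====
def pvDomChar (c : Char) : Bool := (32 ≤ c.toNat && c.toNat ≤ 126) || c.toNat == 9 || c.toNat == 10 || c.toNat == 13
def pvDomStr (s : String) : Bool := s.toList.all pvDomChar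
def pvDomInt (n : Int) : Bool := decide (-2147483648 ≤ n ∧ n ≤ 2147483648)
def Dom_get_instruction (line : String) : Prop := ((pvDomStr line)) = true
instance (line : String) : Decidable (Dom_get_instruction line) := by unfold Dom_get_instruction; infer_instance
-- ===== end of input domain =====

-- B replaces A's char-accumulating loop (index/break bookkeeping) by lstrip + two finds + slicing at the earliest delimiter: a simpler decomposition; a timing run measured B faster (library scans vs a Python-level loop).


-- ===== PORT A =====
-- the 'for index, char in enumerate(line, start=1)' loop of A: idx is the current value of
-- Python's 'index' variable (0 before the first iteration), instr the accumulated instruction chars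
def aLoop : List Char → Int → List Char → Int × List Char
  | [], idx, instr => (idx, instr)
  | c :: rest, idx, instr =>
      let index := idx + 1
      if instr.isEmpty && c == ';' then (index, instr)                      -- if not instruction and char == ';': break
      else if !instr.isEmpty && (c == ' ' || c == ';') then (index, instr)  -- if instruction and char in ' ;': break
      else if c == ' ' then aLoop rest index instr                          -- if char == ' ': continue
      else aLoop rest index (instr ++ [c])                                  -- instruction += char

def get_instruction (line : String) : String × String :=
  let r := aLoop line.toList 0 []
  (String.ofList r.2, PySem.Str.slice line (some r.1) none)                 -- return instruction, line[index:]

-- ===== PORT B =====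
def get_instruction_alt (line : String) : String × String :=
  let s := line.toList.dropWhile (· == ' ')   -- line.lstrip of spaces: exact (drops exactly the leading space characters)
  let ds := ([PySem.Chars.find s [' '], PySem.Chars.find s [';']]).filter (fun i => i != -1)
  match PySem.List.min? ds (fun x => x) with  -- if not ds: return s, ''  … else e = min(ds)
  | none => (String.ofList s, "")
  | some e =>
      (String.ofList (PySem.List.slice s none (some e)),                    -- s[:e]
       String.ofList (PySem.List.slice s (some (e + 1)) none))              -- s[e+1:]

-- ===== PRECONDITION & SPEC =====
def Spec_get_instruction (line : String) (out : String × String) : Prop := out = get_instruction_alt line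
instance (line : String) (out : String × String) : Decidable (Spec_get_instruction line out) := by unfold Spec_get_instruction; infer_instance

-- ===== CLAIM (what is proved, stated in full; the proofs are below) =====
def Claim_equal_get_instruction : Prop := ∀ (line : String), Dom_get_instruction line → Spec_get_instruction line (get_instruction line)

-- ===== LEMMAS AND PROOFS =====

-- the delimiter test shared by both characterisations
def pDelim (c : Char) : Bool := c == ' ' || c == ';'

theorem aLoop_spaces (sp : List Char) (t : List Char) (i : Int)
    (h : ∀ c ∈ sp, c = ' ') : aLoop (sp ++ t) i [] = aLoop t (i + sp.length) [] := by
  induction sp generalizing i with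
  | nil => simp
  | cons c rest ih =>
      have hc : c = ' ' := h c (by simp)
      subst hc
      have step : aLoop (' ' :: (rest ++ t)) i [] = aLoop (rest ++ t) (i + 1) [] := rfl
      rw [List.cons_append, step, ih _ (fun c hc => h c (by simp [hc]))]
      congr 1
      push_cast [List.length_cons]
      ring

theorem aLoop_ne (t : List Char) (i : Int) (instr : List Char) (h : instr ≠ []) :
    aLoop t i instr =
      if t.findIdx pDelim < t.length then (i + t.findIdx pDelim + 1, instr ++ t.take (t.findIdx pDelim))
      else (i + t.length, instr ++ t) := by
  induction t generalizing i instr with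
  | nil => simp [aLoop]
  | cons c rest ih =>
      have hne : instr.isEmpty = false := by simpa [List.isEmpty_iff] using h
      by_cases hd : pDelim c = true
      · have hd' : (c == ' ' || c == ';') = true := by simpa [pDelim] using hd
        simp only [aLoop, hne, Bool.false_and, Bool.not_false, Bool.true_and, hd', if_true,
          if_false, List.findIdx_cons, hd, cond_true, List.length_cons]
        rw [if_pos (Nat.succ_pos _)]
        simp
      · have hd0 : pDelim c = false := by simpa using hd
        have hsp : (c == ' ') = false := by
          have := hd0; simp only [pDelim, Bool.or_eq_false_iff] at this; exact this.1
        have hsemi : (c == ';') = false := by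
          have := hd0; simp only [pDelim, Bool.or_eq_false_iff] at this; exact this.2
        simp only [aLoop, hne, Bool.false_and, Bool.not_false, Bool.true_and, hsp, hsemi,
          Bool.or_false, Bool.and_false, if_false, List.findIdx_cons, hd0, cond_false,
          List.length_cons, Bool.false_eq_true]
        rw [ih _ _ (by simp)]
        split_ifs with h1 h2 h2
        · refine Prod.ext ?_ ?_
          · push_cast; ring
          · simp [List.take_succ_cons]
        · omega
        · omega
        · refine Prod.ext ?_ ?_
          · push_cast; ring
          · simp

theorem aLoop_start (t : List Char) (i : Int) (h : t.head? ≠ some ' ') :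
    aLoop t i [] =
      if t.findIdx pDelim < t.length then (i + t.findIdx pDelim + 1, t.take (t.findIdx pDelim))
      else (i + t.length, t) := by
  cases t with
  | nil => simp [aLoop]
  | cons c rest =>
      have hsp : (c == ' ') = false := by
        simp only [List.head?_cons, ne_eq, Option.some.injEq] at h
        simpa using h
      by_cases hsemi : (c == ';') = true
      · simp only [aLoop, List.isEmpty_nil, hsemi, Bool.true_and, if_true, List.findIdx_cons,
          pDelim, hsp, Bool.false_or, cond_true, List.length_cons]
        rw [if_pos (Nat.succ_pos _)]
        simp
      · have hsemi' : (c == ';') = false := by simpa using hsemi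
        have hd0 : pDelim c = false := by simp [pDelim, hsp, hsemi']
        simp only [aLoop, List.isEmpty_nil, hsemi', Bool.true_and, Bool.not_true, Bool.false_and,
          hsp, Bool.false_eq_true, if_false, List.nil_append, List.findIdx_cons, hd0, cond_false,
          List.length_cons]
        rw [aLoop_ne _ _ _ (by simp)]
        split_ifs with h1 h2 h2
        · refine Prod.ext ?_ ?_
          · push_cast; ring
          · simp [List.take_succ_cons]
        · omega
        · omega
        · refine Prod.ext ?_ ?_
          · push_cast; ring
          · simp

theorem find_singleton (s : List Char) (c : Char) :
    PySem.Chars.find s [c] =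
      if s.findIdx (· == c) < s.length then ((s.findIdx (· == c) : Int)) else -1 := by
  by_cases hmem : c ∈ s
  · have hnn : 0 ≤ PySem.Chars.find s [c] := by
      rw [PySem.Chars.find_nonneg_iff]
      exact (List.singleton_infix_iff c s).mpr hmem
    obtain ⟨hpre, hmin⟩ := PySem.Chars.find_spec hnn
    have hk : s.findIdx (· == c) < s.length := List.findIdx_lt_length.mpr ⟨c, hmem, by simp⟩
    rw [if_pos hk]
    set n := (PySem.Chars.find s [c]).toNat with hn
    have hsn : s[n]? = some c := by
      rcases hpre with ⟨tl, htl⟩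
      rw [← List.head?_drop, ← htl]; rfl
    have h1 : s.findIdx (· == c) ≤ n := by
      by_contra hlt
      push_neg at hlt
      have hnl : n < s.length := by
        have := List.findIdx_le_length (p := (· == c)) (xs := s); omega
      have hfalse := List.not_of_lt_findIdx (xs := s) (p := (· == c)) (i := n) hlt
      rw [List.getElem?_eq_getElem hnl] at hsn
      simp only [Option.some.injEq] at hsn
      simp only [beq_eq_false_iff_ne, ne_eq] at hfalse
      exact hfalse hsn
    have h2 : n ≤ s.findIdx (· == c) := by
      by_contra hlt
      push_neg at hlt
      apply hmin _ hlt
      refine ⟨s.drop (s.findIdx (· == c) + 1), ?_⟩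
      have hget := List.findIdx_getElem (p := (· == c)) (xs := s) (w := hk)
      simp only [beq_iff_eq] at hget
      have hd := List.getElem_cons_drop hk
      rw [hget] at hd
      exact hd
    omega
  · have hnone : PySem.Chars.find s [c] = -1 := by
      rw [PySem.Chars.find_eq_neg_one_iff, List.singleton_infix_iff]
      exact hmem
    rw [hnone, if_neg]
    intro hk
    apply hmem
    have hget := List.findIdx_getElem (p := (· == c)) (xs := s) (w := hk)
    simp only [beq_iff_eq] at hget
    rw [← hget]
    exact List.getElem_mem _

theorem alt_core (t : List Char) :
    (match PySem.List.min? (([PySem.Chars.find t [' '], PySem.Chars.find t [';']]).filter (fun i => i != -1)) (fun x => x) with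
     | none => (String.ofList t, "")
     | some e =>
        (String.ofList (PySem.List.slice t none (some e)),
         String.ofList (PySem.List.slice t (some (e + 1)) none)))
    = (if t.findIdx pDelim < t.length
       then (String.ofList (t.take (t.findIdx pDelim)), String.ofList (t.drop (t.findIdx pDelim + 1)))
       else (String.ofList t, "")) := by
  have hk : t.findIdx pDelim = min (t.findIdx (· == ' ')) (t.findIdx (· == ';')) := by
    rw [List.min_findIdx_findIdx]; rfl
  set ka := t.findIdx (· == ' ') with hka
  set kb := t.findIdx (· == ';') with hkb
  have hle_a : ka ≤ t.length := List.findIdx_le_length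
  have hle_b : kb ≤ t.length := List.findIdx_le_length
  rw [find_singleton t ' ', find_singleton t ';', hk]
  by_cases h1 : ka < t.length <;> by_cases h2 : kb < t.length
  · -- both present
    rw [if_pos h1, if_pos h2]
    have hfil : ([((ka : Int)), ((kb : Int))].filter (fun i => i != -1)) = [((ka : Int)), ((kb : Int))] := by
      have hnea : (((ka : Int)) != -1) = true := by simp
      have hneb : (((kb : Int)) != -1) = true := by simp
      simp [List.filter, hnea, hneb]
    rw [hfil, PySem.List.min?_id_cons]
    have hfold : List.foldl min ((ka : Int)) [((kb : Int))] = ((min ka kb : Nat) : Int) := by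
      simp [List.foldl, Nat.cast_min]
    rw [hfold]
    rw [if_pos (by omega)]
    have he1 : ((min ka kb : Nat) : Int) + 1 = (((min ka kb) + 1 : Nat) : Int) := by push_cast; ring
    simp only [PySem.List.slice_to_natCast, he1, PySem.List.slice_from_natCast]
  · -- only ' '
    have hkb' : kb = t.length := by omega
    rw [if_pos h1, if_neg h2]
    have hfil : ([((ka : Int)), (-1 : Int)].filter (fun i => i != -1)) = [((ka : Int))] := by
      have hne : (((ka : Int)) != -1) = true := by simp
      simp [List.filter, hne]
    rw [hfil, PySem.List.min?_id_cons]
    simp only [List.foldl]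
    rw [if_pos (by omega)]
    have he1 : ((ka : Nat) : Int) + 1 = ((ka + 1 : Nat) : Int) := by push_cast; ring
    have hmink : min ka kb = ka := by omega
    simp only [PySem.List.slice_to_natCast, he1, PySem.List.slice_from_natCast, hmink]
  · -- only ';'
    have hka' : ka = t.length := by omega
    rw [if_neg h1, if_pos h2]
    have hfil : ([(-1 : Int), ((kb : Int))].filter (fun i => i != -1)) = [((kb : Int))] := by
      have hne : (((kb : Int)) != -1) = true := by simp
      simp [List.filter, hne]
    rw [hfil, PySem.List.min?_id_cons]
    simp only [List.foldl]
    rw [if_pos (by omega)]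
    have he1 : ((kb : Nat) : Int) + 1 = ((kb + 1 : Nat) : Int) := by push_cast; ring
    have hmink : min ka kb = kb := by omega
    simp only [PySem.List.slice_to_natCast, he1, PySem.List.slice_from_natCast, hmink]
  · -- neither
    rw [if_neg h1, if_neg h2]
    have hfil : ([(-1 : Int), (-1 : Int)].filter (fun i => i != -1)) = [] := by decide
    rw [hfil, if_neg (by omega)]
    rfl

theorem alt_characterisation (line : String) :
    get_instruction_alt line =
      (if (line.toList.dropWhile (· == ' ')).findIdx pDelim < (line.toList.dropWhile (· == ' ')).length
       then (String.ofList ((line.toList.dropWhile (· == ' ')).take ((line.toList.dropWhile (· == ' ')).findIdx pDelim)),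
             String.ofList ((line.toList.dropWhile (· == ' ')).drop ((line.toList.dropWhile (· == ' ')).findIdx pDelim + 1)))
       else (String.ofList (line.toList.dropWhile (· == ' ')), "")) := by
  rw [← alt_core]
  rfl

theorem head?_dropWhile_not (p : Char → Bool) (l : List Char) (c : Char)
    (h : (l.dropWhile p).head? = some c) : p c = false := by
  induction l with
  | nil => simp at h
  | cons a rest ih =>
      rw [List.dropWhile_cons] at h
      by_cases hp : p a = true
      · rw [if_pos hp] at h; exact ih h
      · rw [if_neg hp] at h
        simp only [List.head?_cons, Option.some.injEq] at h
        subst h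
        simpa using hp

theorem get_instruction_eq_alt (line : String) : get_instruction line = get_instruction_alt line := by
  rw [alt_characterisation]
  have hsplit : line.toList = line.toList.takeWhile (· == ' ') ++ line.toList.dropWhile (· == ' ') :=
    (List.takeWhile_append_dropWhile).symm
  set sp := line.toList.takeWhile (· == ' ') with hsp
  set t := line.toList.dropWhile (· == ' ') with ht
  have hA : aLoop line.toList 0 [] = aLoop t (sp.length : Int) [] := by
    rw [hsplit, aLoop_spaces sp t 0 (fun c hc => by simpa using List.mem_takeWhile_imp hc)]
    simp
  have hhead : t.head? ≠ some ' ' := by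
    intro hco
    rw [ht] at hco
    have := head?_dropWhile_not (· == ' ') line.toList ' ' hco
    simp at this
  rw [get_instruction]
  simp only [hA, aLoop_start t _ hhead]
  by_cases hlt : t.findIdx pDelim < t.length
  · rw [if_pos hlt, if_pos hlt]
    refine Prod.ext (by simp) ?_
    simp only
    apply String.toList_inj.mp
    rw [PySem.Str.toList_slice, String.toList_ofList, PySem.Chars.slice_eq_listSlice]
    have hc : ((sp.length : Int) + (t.findIdx pDelim : Int) + 1) = ((sp.length + t.findIdx pDelim + 1 : Nat) : Int) := by
      push_cast; ring
    rw [hc, PySem.List.slice_from_natCast]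
    conv_lhs => rw [hsplit]
    rw [List.drop_append]
    have h1 : sp.drop (sp.length + t.findIdx pDelim + 1) = [] := by
      apply List.drop_eq_nil_of_le; omega
    rw [h1, List.nil_append]
    congr 1
    omega
  · rw [if_neg hlt, if_neg hlt]
    refine Prod.ext (by simp) ?_
    simp only
    apply String.toList_inj.mp
    rw [PySem.Str.toList_slice, PySem.Chars.slice_eq_listSlice]
    have hc : ((sp.length : Int) + (t.length : Int)) = ((sp.length + t.length : Nat) : Int) := by
      push_cast; ring
    rw [hc, PySem.List.slice_from_natCast]
    conv_lhs => rw [hsplit]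
    rw [List.drop_append]
    have h1 : sp.drop (sp.length + t.length) = [] := by
      apply List.drop_eq_nil_of_le; omega
    have h2 : t.drop (sp.length + t.length - sp.length) = [] := by
      apply List.drop_eq_nil_of_le; omega
    rw [h1, h2]
    rfl

-- ===== VERDICT (by name: the statement is the Claim_ definition above) =====
theorem get_instruction_spec : Claim_equal_get_instruction := by
  intro line _
  unfold Spec_get_instruction
  exact get_instruction_eq_alt line
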